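-- pv_equiv track=rewrite | github.com/claudio-ICL/smml | smml/misc.py | sequential_index
-- ===== SOURCE A (Python) =====
-- def sequential_index(
--         multiindex: list[int],
--         dim: int = 1,
-- ) -> int:
--     assert dim > 0
--     n: int = 0
--     b: int = 1
--     for i in reversed(multiindex):
--         assert i > 0
--         n += b*i
--         b *= dim
--     return n
-- ===== SOURCE B (Python) =====
-- def sequential_index(
--         multiindex: list[int],
--         dim: int = 1,
-- ) -> int:
--     assert dim > 0
--     if not multiindex:
--         return 0
--     head, rest = multiindex[0], multiindex[1:]
--     assert head > 0
--     return head * dim ** len(rest) + sequential_index(rest, dim)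
-- ===== Notes on version B (the rewrite author's own statement) =====
-- stated objective: alternative
-- what changed: Replaces the iterative reversed loop with a pair of accumulators (running sum n and running power b) by head recursion on the list, weighting the head directly by dim**len(rest) and recursing on the tail.
import Mathlib
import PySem

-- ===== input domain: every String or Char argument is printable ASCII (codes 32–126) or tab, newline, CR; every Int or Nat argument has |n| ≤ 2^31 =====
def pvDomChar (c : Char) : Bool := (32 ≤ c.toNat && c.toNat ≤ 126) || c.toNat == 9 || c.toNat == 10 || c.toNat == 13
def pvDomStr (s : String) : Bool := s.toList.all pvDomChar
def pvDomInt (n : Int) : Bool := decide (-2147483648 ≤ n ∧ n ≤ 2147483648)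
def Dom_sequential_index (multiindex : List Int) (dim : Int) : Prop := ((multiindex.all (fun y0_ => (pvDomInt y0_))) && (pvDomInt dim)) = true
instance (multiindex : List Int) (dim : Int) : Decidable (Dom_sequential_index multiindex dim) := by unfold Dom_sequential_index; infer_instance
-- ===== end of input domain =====

-- B replaces the iterative reversed loop with two accumulators by head recursion weighting the head by dim^len(rest); alternative decomposition, same O(n) passes.

-- ===== PORT A =====
-- reversed loop with state (n, b): n += b*i; b *= dim  (asserts are in Pre_)
def sequential_index (multiindex : List Int) (dim : Int) : Int :=
  (multiindex.reverse.foldl (fun (s : Int × Int) (i : Int) => (s.1 + s.2 * i, s.2 * dim)) (0, 1)).1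

-- ===== PORT B =====
-- head recursion: empty -> 0; head::rest -> head * dim^len(rest) + recurse on rest
def sequential_index_alt : List Int → Int → Int
  | [], _ => 0
  | head :: rest, dim => head * dim ^ rest.length + sequential_index_alt rest dim

-- ===== PRECONDITION & SPEC =====
-- Pre_ excludes exactly the inputs where A's asserts fail (AssertionError): dim ≤ 0 or a non-positive element.
def Pre_sequential_index (multiindex : List Int) (dim : Int) : Prop :=
  0 < dim ∧ ∀ i ∈ multiindex, 0 < i
instance (multiindex : List Int) (dim : Int) : Decidable (Pre_sequential_index multiindex dim) := by unfold Pre_sequential_index; infer_instance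
def pvWitness_sequential_index : List Int × Int := ([2, 1, 3], 4)

def Spec_sequential_index (multiindex : List Int) (dim : Int) (out : Int) : Prop := out = sequential_index_alt multiindex dim
instance (multiindex : List Int) (dim : Int) (out : Int) : Decidable (Spec_sequential_index multiindex dim out) := by unfold Spec_sequential_index; infer_instance

-- ===== CLAIM (what is proved, stated in full; the proofs are below) =====
def Claim_equal_sequential_index : Prop := ∀ (multiindex : List Int) (dim : Int), Dom_sequential_index multiindex dim → Pre_sequential_index multiindex dim → Spec_sequential_index multiindex dim (sequential_index multiindex dim)

-- ===== LEMMAS AND PROOFS =====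

-- A's reversed fold from an arbitrary state (n0, b0) equals (n0 + b0 * B's value, b0 * dim^length).
theorem fold_reverse_eq (dim : Int) (l : List Int) : ∀ (n0 b0 : Int),
    l.reverse.foldl (fun (s : Int × Int) (i : Int) => (s.1 + s.2 * i, s.2 * dim)) (n0, b0)
      = (n0 + b0 * sequential_index_alt l dim, b0 * dim ^ l.length) := by
  induction l with
  | nil => intro n0 b0; simp [sequential_index_alt]
  | cons i t ih =>
      intro n0 b0
      simp only [List.reverse_cons, List.foldl_append, List.foldl_cons, List.foldl_nil,
        List.length_cons, ih, sequential_index_alt, Prod.mk.injEq]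
      exact ⟨by ring, by ring⟩

-- ===== VERDICT (by name: the statement is the Claim_ definition above) =====
theorem sequential_index_spec : Claim_equal_sequential_index := by
  intro multiindex dim _ _
  unfold Spec_sequential_index sequential_index
  rw [fold_reverse_eq]
  ring
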